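-- pv_equiv track=rewrite | github.com/RickDude01/fai_tool_vP | utils/whitelist.py | get_whitelist_status
-- ===== SOURCE A (Python) =====
-- from typing import Dict, List, Optional, Set
--
-- def check_whitelist(
--     vendor: str,
--     part_number_vp: str,
--     whitelist_rows: List[Dict[str, str]],
-- ) -> Optional[Dict[str, str]]:
--     """
--     Return the first matching whitelist row, or None.
--
--     Match criteria (both case-insensitive, stripped):
--       - whitelist Vendor == vendor
--       - part_number_vp starts with whitelist Base PN
--     """
--     if not vendor or not vendor.strip():
--         raise ValueError("check_whitelist called with empty vendor.")
--     if not part_number_vp or not part_number_vp.strip():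
--         raise ValueError("check_whitelist called with empty part_number_vp.")
--
--     vendor_lower = vendor.lower().strip()
--     pn_lower = part_number_vp.lower().strip()
--
--     for row in whitelist_rows:
--         wl_vendor = row.get("Vendor", "").lower().strip()
--         wl_base_pn = row.get("Base PN", "").lower().strip()
--
--         if not wl_vendor or not wl_base_pn:
--             continue  # skip malformed whitelist rows instead of crashing
--
--         if len(wl_base_pn.split("-")) < 2:  # skip product-type-only entries (e.g. "FT", "FA")
--             continue
--
--         if vendor_lower == wl_vendor and pn_lower.startswith(wl_base_pn):
--             return row
--
--         wl_parts = wl_base_pn.split("-")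
--         pn_parts = pn_lower.split("-")
--
--         # Match when the searched PN is the Base PN minus its cable-length
--         # suffix: Base PN is exactly 1 segment longer (≥5 total) and starts with
--         # the searched PN.  Requires ≥5 segments so short entries like "HDM-FL"
--         # (2 segs) cannot be triggered by a bare "HDM" (1 seg) search.
--         if (
--             vendor_lower == wl_vendor
--             and len(wl_parts) >= 5
--             and len(wl_parts) == len(pn_parts) + 1
--             and wl_base_pn.startswith(pn_lower + "-")
--         ):
--             return row
--
--         # Match cable-length variants: same segment count, all segments identical
--         # except the last (cable-length code).  No minimum segment threshold —
--         # single-segment entries are already excluded by the < 2 skip above, and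
--         # wl_parts[:-1] == pn_parts[:-1] is specific enough on its own.
--         # e.g. whitelist HDM-FL-SM-LC-QSFP-M3 matches HDM-FL-SM-LC-QSFP-M2 / -MX
--         #      whitelist FA-SM-LC-M3            matches FA-SM-LC-M2
--         if (
--             vendor_lower == wl_vendor
--             and len(wl_parts) == len(pn_parts)
--             and wl_parts[:-1] == pn_parts[:-1]
--         ):
--             return row
--
--     return None
--
-- def get_whitelist_status(
--     matched_rows: List[Dict[str, str]],
--     supplier_col: str,
--     pn_col: str,
--     whitelist_rows: List[Dict[str, str]],
-- ) -> Dict[str, Optional[Dict[str, str]]]: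
--     """
--     For each unique Part Number VP in matched_rows, check whitelist.
--     Uses the actual Supplier value from the row.
--     Returns {part_number_vp: whitelist_row_or_None}.
--     """
--     pn_supplier: Dict[str, str] = {}
--     for row in matched_rows:
--         pn = row.get(pn_col, "")
--         if pn and pn not in pn_supplier:
--             pn_supplier[pn] = row.get(supplier_col, "")
--
--     return {
--         pn: check_whitelist(supplier, pn, whitelist_rows) if supplier else None
--         for pn, supplier in pn_supplier.items()
--     }
-- ===== SOURCE B (Python) =====
-- def get_whitelist_status(matched_rows, supplier_col, pn_col, whitelist_rows):
--     # Normalize the whitelist once and bucket the usable rows by vendor,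
--     # so each part number only scans rows of its own supplier.
--     def norm(row):
--         wv = row.get("Vendor", "").lower().strip()
--         wb = row.get("Base PN", "").lower().strip()
--         if not wv or not wb:
--             return None
--         parts = wb.split("-")
--         if len(parts) < 2:
--             return None
--         return (wv, (wb, parts, row))
--
--     prep = [t for t in map(norm, whitelist_rows) if t is not None]
--     index = {}
--     for wv, entry in prep:
--         index.setdefault(wv, []).append(entry)
--
--     seen = {}
--     for row in matched_rows:
--         pn = row.get(pn_col, "")
--         if pn:
--             seen.setdefault(pn, row.get(supplier_col, ""))
--
--     out = {}
--     for pn, supplier in seen.items():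
--         vendor = supplier.lower().strip() if supplier else ""
--         match = None
--         if vendor:
--             pn_lower = pn.lower().strip()
--             pn_parts = pn_lower.split("-")
--             for wb, wparts, row in index.get(vendor, []):
--                 if (pn_lower.startswith(wb)
--                         or (len(wparts) >= 5
--                             and len(wparts) == len(pn_parts) + 1
--                             and wb.startswith(pn_lower + "-"))
--                         or (len(wparts) == len(pn_parts)
--                             and wparts[:-1] == pn_parts[:-1])):
--                     match = row
--                     break
--         out[pn] = match
--     return out
-- ===== Notes on version B (the rewrite author's own statement) =====
-- stated objective: alternative
-- what changed: B normalizes and splits every whitelist row once and indexes the usable rows by vendor, so each unique part number scans only its own vendor's pre-normalized bucket instead of re-normalizing and re-splitting the whole whitelist per part number as A does.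
import Mathlib
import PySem

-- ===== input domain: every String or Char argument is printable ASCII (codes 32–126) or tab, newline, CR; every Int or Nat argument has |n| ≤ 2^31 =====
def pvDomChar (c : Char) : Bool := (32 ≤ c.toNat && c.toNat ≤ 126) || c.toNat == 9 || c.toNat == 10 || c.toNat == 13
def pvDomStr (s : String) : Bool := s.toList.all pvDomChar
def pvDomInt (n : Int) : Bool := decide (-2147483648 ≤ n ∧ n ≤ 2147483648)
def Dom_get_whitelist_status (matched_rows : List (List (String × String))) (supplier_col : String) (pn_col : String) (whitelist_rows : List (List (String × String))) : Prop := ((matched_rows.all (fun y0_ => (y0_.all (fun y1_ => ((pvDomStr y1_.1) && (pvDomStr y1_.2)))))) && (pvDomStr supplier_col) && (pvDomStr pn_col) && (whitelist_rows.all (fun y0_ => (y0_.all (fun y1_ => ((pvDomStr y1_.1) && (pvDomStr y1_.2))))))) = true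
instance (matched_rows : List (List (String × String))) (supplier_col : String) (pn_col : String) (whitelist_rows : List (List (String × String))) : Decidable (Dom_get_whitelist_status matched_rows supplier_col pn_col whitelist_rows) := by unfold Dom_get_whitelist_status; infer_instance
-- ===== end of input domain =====

-- ===== PORT A =====
-- B changes the whitelist scan: normalize+index the whitelist by vendor once, then each part number
-- scans only the pre-normalized rows of its own vendor (objective: alternative; exact same results).

-- row.get(k, "") — a Python row-dict is an assoc list; lookup is first match
def pvRowGet (row : List (String × String)) (k : String) : String :=
  (PySem.Dict.mk row).getD k ""

-- s.lower().strip()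
def pvNorm (s : String) : String := PySem.Str.strip (PySem.Str.lower s)

-- s.split("-") (separator nonempty, so Python's split is PySem.Chars.splitOn; exact)
def pvSplitDash (s : String) : List (List Char) := PySem.Chars.splitOn s.toList ['-']

def check_whitelist_go (vl pnl : String) : List (List (String × String)) → Option (List (String × String))
  | [] => none
  | row :: rest =>
    let wv := pvNorm (pvRowGet row "Vendor")
    let wb := pvNorm (pvRowGet row "Base PN")
    if wv = "" ∨ wb = "" then check_whitelist_go vl pnl rest
    else if (pvSplitDash wb).length < 2 then check_whitelist_go vl pnl rest
    else if vl = wv ∧ PySem.Str.startswith pnl wb = true then some row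
    else
      let wp := pvSplitDash wb
      let pp := pvSplitDash pnl
      if vl = wv ∧ 5 ≤ wp.length ∧ wp.length = pp.length + 1 ∧ PySem.Str.startswith wb (pnl ++ "-") = true then some row
      else if vl = wv ∧ wp.length = pp.length ∧ wp.dropLast = pp.dropLast then some row
      else check_whitelist_go vl pnl rest

-- Python raises ValueError on empty/whitespace vendor or pn; those inputs are outside Pre_,
-- `none` here merely stands in for the exception.
def check_whitelist (vendor : String) (part_number_vp : String)
    (whitelist_rows : List (List (String × String))) : Option (List (String × String)) :=
  if vendor = "" ∨ PySem.Str.strip vendor = "" then none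
  else if part_number_vp = "" ∨ PySem.Str.strip part_number_vp = "" then none
  else check_whitelist_go (pvNorm vendor) (pvNorm part_number_vp) whitelist_rows

def get_whitelist_status (matched_rows : List (List (String × String))) (supplier_col : String) (pn_col : String) (whitelist_rows : List (List (String × String))) : List (String × Option (List (String × String))) :=
  let pn_supplier := matched_rows.foldl (fun d row =>
    let pn := pvRowGet row pn_col
    if pn ≠ "" ∧ d.contains pn = false then d.insert pn (pvRowGet row supplier_col) else d)
    (PySem.Dict.empty)
  pn_supplier.items.map (fun p =>
    (p.1, if p.2 ≠ "" then check_whitelist p.2 p.1 whitelist_rows else none))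

-- ===== PORT B =====
-- norm(row): normalize one whitelist row once; None = unusable row
def pvNormRow (row : List (String × String)) :
    Option (String × (String × List (List Char) × List (String × String))) :=
  let wv := pvNorm (pvRowGet row "Vendor")
  let wb := pvNorm (pvRowGet row "Base PN")
  if wv = "" ∨ wb = "" then none
  else
    let parts := pvSplitDash wb
    if parts.length < 2 then none
    else some (wv, (wb, parts, row))

-- the inner for-loop over one vendor's bucket
def pvScan (pnl : String) (pparts : List (List Char)) :
    List (String × List (List Char) × List (String × String)) → Option (List (String × String))
  | [] => none
  | (wb, wparts, row) :: rest =>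
    if PySem.Str.startswith pnl wb = true
       ∨ (5 ≤ wparts.length ∧ wparts.length = pparts.length + 1 ∧ PySem.Str.startswith wb (pnl ++ "-") = true)
       ∨ (wparts.length = pparts.length ∧ wparts.dropLast = pparts.dropLast)
    then some row else pvScan pnl pparts rest

def get_whitelist_status_alt (matched_rows : List (List (String × String))) (supplier_col : String) (pn_col : String) (whitelist_rows : List (List (String × String))) : List (String × Option (List (String × String))) :=
  let prep := whitelist_rows.filterMap pvNormRow
  let index := prep.foldl (fun d p => d.modify p.1 [] (fun x => x ++ [p.2])) PySem.Dict.empty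
  let seen := matched_rows.foldl (fun d row =>
    let pn := pvRowGet row pn_col
    if pn ≠ "" then d.setdefault pn (pvRowGet row supplier_col) else d)
    (PySem.Dict.empty)
  seen.items.map (fun p =>
    let vendor := if p.2 ≠ "" then pvNorm p.2 else ""
    (p.1, if vendor ≠ "" then
            let pnl := pvNorm p.1
            pvScan pnl (pvSplitDash pnl) (index.getD vendor [])
          else none))

-- ===== PRECONDITION & SPEC =====
-- Pre_ excludes exactly the inputs on which A raises ValueError: a first occurrence of a part
-- number whose value (or whose supplier value, when nonempty) is nonempty but all-whitespace.
-- In Python s.lower().strip() and s.strip() are empty together; both spellings are carried so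
-- that each port's literal guard is available directly.
def pvRowOK (row : List (String × String)) (supplier_col pn_col : String) : Prop :=
  pvRowGet row pn_col ≠ "" → pvRowGet row supplier_col ≠ "" →
    (PySem.Str.strip (pvRowGet row pn_col) ≠ "" ∧ pvNorm (pvRowGet row pn_col) ≠ "" ∧
     PySem.Str.strip (pvRowGet row supplier_col) ≠ "" ∧ pvNorm (pvRowGet row supplier_col) ≠ "")

def Pre_get_whitelist_status (matched_rows : List (List (String × String))) (supplier_col : String) (pn_col : String) (whitelist_rows : List (List (String × String))) : Prop :=
  ∀ (i : Nat) (hi : i < matched_rows.length),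
    (∀ (j : Nat) (hj : j < matched_rows.length), j < i →
       pvRowGet (matched_rows[j]'hj) pn_col ≠ pvRowGet (matched_rows[i]'hi) pn_col) →
    pvRowOK (matched_rows[i]'hi) supplier_col pn_col

instance (matched_rows : List (List (String × String))) (supplier_col : String) (pn_col : String) (whitelist_rows : List (List (String × String))) : Decidable (Pre_get_whitelist_status matched_rows supplier_col pn_col whitelist_rows) := by
  unfold Pre_get_whitelist_status pvRowOK; infer_instance

def pvWitness_get_whitelist_status : (List (List (String × String))) × String × String × (List (List (String × String))) :=
  ([[("pn", "A-B-1"), ("sup", "Acme")]], "sup", "pn",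
   [[("Vendor", "acme"), ("Base PN", "A-B")]])

def Spec_get_whitelist_status (matched_rows : List (List (String × String))) (supplier_col : String) (pn_col : String) (whitelist_rows : List (List (String × String))) (out : List (String × Option (List (String × String)))) : Prop := out = get_whitelist_status_alt matched_rows supplier_col pn_col whitelist_rows
instance (matched_rows : List (List (String × String))) (supplier_col : String) (pn_col : String) (whitelist_rows : List (List (String × String))) (out : List (String × Option (List (String × String)))) : Decidable (Spec_get_whitelist_status matched_rows supplier_col pn_col whitelist_rows out) := by unfold Spec_get_whitelist_status; infer_instance

-- ===== CLAIM (what is proved, stated in full; the proofs are below) =====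
def Claim_equal_get_whitelist_status : Prop := ∀ (matched_rows : List (List (String × String))) (supplier_col : String) (pn_col : String) (whitelist_rows : List (List (String × String))), Dom_get_whitelist_status matched_rows supplier_col pn_col whitelist_rows → Pre_get_whitelist_status matched_rows supplier_col pn_col whitelist_rows → Spec_get_whitelist_status matched_rows supplier_col pn_col whitelist_rows (get_whitelist_status matched_rows supplier_col pn_col whitelist_rows)


-- ===== LEMMAS AND PROOFS =====

-- the two seen-dict building steps are the same function
theorem pv_step_eq (supplier_col pn_col : String) :
    (fun (d : PySem.Dict String String) (row : List (String × String)) =>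
      let pn := pvRowGet row pn_col
      if pn ≠ "" ∧ d.contains pn = false then d.insert pn (pvRowGet row supplier_col) else d)
    = (fun (d : PySem.Dict String String) (row : List (String × String)) =>
      let pn := pvRowGet row pn_col
      if pn ≠ "" then d.setdefault pn (pvRowGet row supplier_col) else d) := by
  funext d row
  by_cases h : pvRowGet row pn_col = ""
  · simp [h]
  · by_cases hc : d.contains (pvRowGet row pn_col)
    · simp [h, hc, PySem.Dict.setdefault_of_contains]
    · simp only [Bool.not_eq_true] at hc
      simp [h, hc, PySem.Dict.setdefault_of_not_contains]

-- every item of the seen dict comes from the first matched row carrying its part number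
theorem pv_mem_items_build (supplier_col pn_col : String)
    (L : List (List (String × String))) (d : PySem.Dict String String)
    (p : String × String)
    (hp : p ∈ (L.foldl (fun d row =>
      let pn := pvRowGet row pn_col
      if pn ≠ "" ∧ d.contains pn = false then d.insert pn (pvRowGet row supplier_col) else d) d).items) :
    p ∈ d.items ∨ (p.1 ≠ "" ∧ d.contains p.1 = false ∧
      ∃ (i : Nat) (hi : i < L.length),
        pvRowGet (L[i]'hi) pn_col = p.1 ∧ pvRowGet (L[i]'hi) supplier_col = p.2 ∧
        ∀ (j : Nat) (hj : j < L.length), j < i → pvRowGet (L[j]'hj) pn_col ≠ p.1) := by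
  induction L generalizing d with
  | nil => simpa using hp
  | cons row rest ih =>
    simp only [List.foldl_cons] at hp
    rcases ih _ hp with h | ⟨hne, hnc, i, hi, hpn, hsup, hfirst⟩
    · by_cases hg : pvRowGet row pn_col ≠ "" ∧ d.contains (pvRowGet row pn_col) = false
      · rw [if_pos hg] at h
        rcases (PySem.Dict.mem_items_insert _ _ _ _).1 h with h | ⟨h, hne⟩
        · subst h
          refine Or.inr ⟨hg.1, hg.2, 0, by simp, rfl, rfl, ?_⟩
          intro j hj hji; omega
        · exact Or.inl h
      · rw [if_neg hg] at h
        exact Or.inl h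
    · by_cases hg : pvRowGet row pn_col ≠ "" ∧ d.contains (pvRowGet row pn_col) = false
      · rw [if_pos hg] at hnc
        rw [PySem.Dict.contains_insert] at hnc
        simp only [Bool.or_eq_false_iff, beq_eq_false_iff_ne, ne_eq] at hnc
        refine Or.inr ⟨hne, hnc.2, i + 1, by simpa using hi, hpn, hsup, ?_⟩
        intro j hj hji
        match j with
        | 0 =>
          simp only [List.getElem_cons_zero]
          exact fun hcontra => hnc.1 hcontra.symm
        | j' + 1 =>
          simp only [List.getElem_cons_succ]
          exact hfirst j' (by simpa using hj) (by omega)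
      · rw [if_neg hg] at hnc
        refine Or.inr ⟨hne, hnc, i + 1, by simpa using hi, hpn, hsup, ?_⟩
        intro j hj hji
        match j with
        | 0 =>
          simp only [List.getElem_cons_zero]
          intro hcontra
          rw [Classical.not_and_iff_not_or_not] at hg
          rcases hg with hg | hg
          · rw [Classical.not_not] at hg; rw [hg] at hcontra; exact hne hcontra.symm
          · rw [hcontra] at hg; exact hg (by simp [hnc])
        | j' + 1 =>
          simp only [List.getElem_cons_succ]
          exact hfirst j' (by simpa using hj) (by omega)

-- an if-chain returning the same value, with a true shared first conjunct, is the if of the disjunction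
theorem pv_ifchain {R : Type} (e c1 c2 c3 : Prop) [Decidable e] [Decidable c1] [Decidable c2] [Decidable c3]
    (he : e) (r : Option R) (x y : Option R) (hxy : x = y) :
    (if e ∧ c1 then r else if e ∧ c2 then r else if e ∧ c3 then r else x)
      = (if c1 ∨ c2 ∨ c3 then r else y) := by
  split_ifs <;> tauto

-- A's per-part-number scan over the whole whitelist equals B's scan over the vendor's bucket
theorem pv_go_eq_scan (wl : List (List (String × String))) (vl pnl : String) :
    check_whitelist_go vl pnl wl
      = pvScan pnl (pvSplitDash pnl)
          (((wl.filterMap pvNormRow).filter (fun p => p.1 == vl)).map (fun x => x.2)) := by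
  induction wl with
  | nil => simp [check_whitelist_go, pvScan]
  | cons row rest ih =>
    by_cases h1 : pvNorm (pvRowGet row "Vendor") = "" ∨ pvNorm (pvRowGet row "Base PN") = ""
    · simp [check_whitelist_go, pvNormRow, h1, ih]
    · rw [not_or] at h1
      by_cases h2 : (pvSplitDash (pvNorm (pvRowGet row "Base PN"))).length < 2
      · have h2' : (pvSplitDash (pvNorm (pvRowGet row "Base PN"))).length ≤ 1 := by omega
        simp [check_whitelist_go, pvNormRow, h1.1, h1.2, h2, h2', ih]
      · have h2' : ¬ (pvSplitDash (pvNorm (pvRowGet row "Base PN"))).length ≤ 1 := by omega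
        by_cases hv : pvNorm (pvRowGet row "Vendor") = vl
        · subst hv
          have hg1 : ¬ (pvNorm (pvRowGet row "Vendor") = "" ∨ pvNorm (pvRowGet row "Base PN") = "") := not_or.mpr h1
          have hrow : pvNormRow row = some (pvNorm (pvRowGet row "Vendor"),
              (pvNorm (pvRowGet row "Base PN"), pvSplitDash (pvNorm (pvRowGet row "Base PN")), row)) := by
            unfold pvNormRow; rw [if_neg hg1, if_neg h2]
          rw [List.filterMap_cons_some hrow, List.filter_cons_of_pos (by simp), List.map_cons]
          rw [check_whitelist_go, pvScan]
          rw [if_neg hg1, if_neg h2]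
          exact pv_ifchain _ _ _ _ rfl _ _ _ ih
        · have hv' : ¬ (vl = pvNorm (pvRowGet row "Vendor")) := fun h => hv h.symm
          simp [check_whitelist_go, pvNormRow, h1.1, h1.2, h2, h2', hv, hv', ih]

-- ===== VERDICT (by name: the statement is the Claim_ definition above) =====
theorem get_whitelist_status_spec : Claim_equal_get_whitelist_status := by
  unfold Claim_equal_get_whitelist_status Spec_get_whitelist_status
  intro mr sc pc wl _ hpre
  simp only [get_whitelist_status, get_whitelist_status_alt]
  rw [← pv_step_eq sc pc]
  refine List.map_congr_left ?_
  intro p hp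
  rcases pv_mem_items_build sc pc mr PySem.Dict.empty p hp with h | ⟨hne, _, i, hi, hpn, hsup, hfirst⟩
  · simp [PySem.Dict.empty] at h
  · by_cases hs : p.2 = ""
    · simp [hs]
    · have hok := hpre i hi (fun j hj hji => by rw [hpn]; exact hfirst j hj hji)
      have hok' := hok (by rw [hpn]; exact hne) (by rw [hsup]; exact hs)
      rw [hpn, hsup] at hok'
      obtain ⟨hstrip_pn, hnorm_pn, hstrip_sup, hnorm_sup⟩ := hok'
      have hA : (if p.2 ≠ "" then check_whitelist p.2 p.1 wl else none)
          = check_whitelist_go (pvNorm p.2) (pvNorm p.1) wl := by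
        rw [if_pos hs]
        unfold check_whitelist
        rw [if_neg (not_or.mpr ⟨hs, hstrip_sup⟩), if_neg (not_or.mpr ⟨hne, hstrip_pn⟩)]
      rw [hA, pv_go_eq_scan]
      rw [if_pos hs, if_pos hnorm_sup, PySem.Dict.getD_foldl_modify_append]
      rw [PySem.Dict.getD_empty, List.nil_append]
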